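-- pv_equiv track=rewrite | github.com/shepherdjay/reddit_challenges | challenges/challenge358_ez.py | split_to_individual
-- ===== SOURCE A (Python) =====
-- def split_to_individual(string: str) -> list:
--     split_list = []
--     length_of_row = len(string) // 3
--     numbers = length_of_row // 3
--
--     for number in range(numbers):
--         start_index = number * 3
--         end_index = start_index + 3
--         split_list.append(
--             string[start_index:end_index] +
--             string[start_index + length_of_row:end_index + length_of_row] +
--             string[start_index + length_of_row * 2: end_index + length_of_row * 2]
--         )
--     return split_list
-- ===== SOURCE B (Python) =====
-- def split_to_individual(string: str) -> list:
--     length_of_row = len(string) // 3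
--     r0 = string[:length_of_row]
--     r1 = string[length_of_row:2 * length_of_row]
--     r2 = string[2 * length_of_row:3 * length_of_row]
--     split_list = []
--     while len(r0) >= 3:
--         split_list.append(r0[:3] + r1[:3] + r2[:3])
--         r0, r1, r2 = r0[3:], r1[3:], r2[3:]
--     return split_list
-- ===== Notes on version B (the rewrite author's own statement) =====
-- stated objective: alternative
-- what changed: A computes each output element by index arithmetic (start/end offsets into the whole string) over range(numbers); B slices off the three rows once and then consumes them as three parallel streams, repeatedly taking and dropping a 3-char prefix of each until the first row is exhausted, with no index arithmetic or precomputed chunk count.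
import Mathlib
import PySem

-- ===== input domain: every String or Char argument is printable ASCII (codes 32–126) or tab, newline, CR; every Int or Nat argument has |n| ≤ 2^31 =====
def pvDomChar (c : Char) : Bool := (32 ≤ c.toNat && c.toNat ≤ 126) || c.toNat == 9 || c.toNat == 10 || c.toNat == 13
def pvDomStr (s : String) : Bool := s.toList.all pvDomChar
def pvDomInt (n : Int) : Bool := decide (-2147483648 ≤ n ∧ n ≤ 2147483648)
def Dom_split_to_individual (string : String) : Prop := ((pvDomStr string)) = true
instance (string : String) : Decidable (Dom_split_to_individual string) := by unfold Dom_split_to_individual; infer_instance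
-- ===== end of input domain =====

-- B replaces A's index-arithmetic loop over range(numbers) by slicing off the three rows once
-- and consuming them as three parallel streams, 3-char prefixes at a time; same cost, alternative structure.

-- ===== PORT A =====
def split_to_individual (string : String) : List String :=
  let s := string.toList
  let length_of_row : Int := PySem.Int.floordiv (s.length : Int) 3
  let numbers : Int := PySem.Int.floordiv length_of_row 3
  (PySem.List.pyRange 0 numbers 1).foldl (fun acc number =>
    let start_index := number * 3
    let end_index := start_index + 3
    acc ++ [String.ofList (
      PySem.List.slice s (some start_index) (some end_index) ++
      PySem.List.slice s (some (start_index + length_of_row)) (some (end_index + length_of_row)) ++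
      PySem.List.slice s (some (start_index + length_of_row * 2)) (some (end_index + length_of_row * 2)))]) []

-- ===== PORT B =====
-- the while loop of Source B: consume the three rows 3 chars at a time until the first is exhausted
def splitGo (r0 r1 r2 : List Char) (acc : List String) : List String :=
  if 3 ≤ r0.length then
    splitGo (r0.drop 3) (r1.drop 3) (r2.drop 3)
      (acc ++ [String.ofList (r0.take 3 ++ r1.take 3 ++ r2.take 3)])
  else acc
termination_by r0.length
decreasing_by simp; omega

def split_to_individual_alt (string : String) : List String :=
  let s := string.toList
  let length_of_row : Int := PySem.Int.floordiv (s.length : Int) 3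
  let r0 := PySem.List.slice s none (some length_of_row)
  let r1 := PySem.List.slice s (some length_of_row) (some (2 * length_of_row))
  let r2 := PySem.List.slice s (some (2 * length_of_row)) (some (3 * length_of_row))
  splitGo r0 r1 r2 []

-- ===== PRECONDITION & SPEC =====
def Spec_split_to_individual (string : String) (out : List String) : Prop := out = split_to_individual_alt string
instance (string : String) (out : List String) : Decidable (Spec_split_to_individual string out) := by unfold Spec_split_to_individual; infer_instance

-- ===== CLAIM (what is proved, stated in full; the proofs are below) =====
def Claim_equal_split_to_individual : Prop := ∀ (string : String), Dom_split_to_individual string → Spec_split_to_individual string (split_to_individual string)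

-- ===== LEMMAS AND PROOFS =====

-- a slice of width 3 starting at a nonnegative index, as drop/take
lemma slice3 (s : List Char) (a : Int) (ha : 0 ≤ a) :
    PySem.List.slice s (some a) (some (a + 3)) = (s.drop a.toNat).take 3 := by
  rw [PySem.List.slice_toNat s ha (by omega), show (a + 3).toNat - a.toNat = 3 by omega]

-- chunk [m, m+3) of the row s[a : a+L] is chunk [a+m, a+m+3) of s when it fits in the row
lemma chunk_of_row (s : List Char) (a L m : Nat) (h : m + 3 ≤ L) :
    (((s.drop a).take L).drop m).take 3 = (s.drop (a + m)).take 3 := by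
  rw [List.drop_take, List.drop_drop, List.take_take, show min 3 (L - m) = 3 by omega]

-- the while loop as a map over chunk indices
lemma splitGo_eq_map (r0 r1 r2 : List Char) (acc : List String) :
    splitGo r0 r1 r2 acc = acc ++ (List.range (r0.length / 3)).map (fun j =>
      String.ofList ((r0.drop (3 * j)).take 3 ++ (r1.drop (3 * j)).take 3 ++ (r2.drop (3 * j)).take 3)) := by
  induction hn : r0.length using Nat.strong_induction_on generalizing r0 r1 r2 acc with
  | _ n ih =>
  subst hn
  rw [splitGo]
  split_ifs with h
  · rw [ih (r0.drop 3).length (by simp; omega) _ _ _ _ rfl]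
    have h3 : r0.length / 3 = (r0.drop 3).length / 3 + 1 := by
      simp only [List.length_drop]; omega
    rw [h3, List.range_succ_eq_map, List.map_cons, List.map_map]
    simp only [Nat.mul_zero, List.drop_zero, List.append_assoc, List.cons_append,
      List.nil_append]
    congr 1
    congr 1
    apply List.map_congr_left

    intro j _
    rw [List.drop_drop, List.drop_drop, List.drop_drop]
    simp only [Function.comp_apply, Nat.succ_eq_add_one]
    rw [show 3 * (j + 1) = 3 + 3 * j by ring]
  · rw [show r0.length / 3 = 0 by omega]
    simp

-- ===== VERDICT (by name: the statement is the Claim_ definition above) =====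
theorem split_to_individual_spec : Claim_equal_split_to_individual := by
  intro string _
  unfold Spec_split_to_individual split_to_individual split_to_individual_alt
  simp only [PySem.List.foldl_append_singleton_eq_map]
  set s := string.toList with hs
  have hL : PySem.Int.floordiv ((s.length : Int)) 3 = ((s.length / 3 : Nat) : Int) := by
    exact_mod_cast PySem.Int.floordiv_natCast s.length 3
  have hN : PySem.Int.floordiv (((s.length / 3 : Nat) : Int)) 3 = ((s.length / 3 / 3 : Nat) : Int) := by
    exact_mod_cast PySem.Int.floordiv_natCast (s.length / 3) 3
  rw [hL, hN, splitGo_eq_map]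
  -- rows as drop/take of s
  rw [PySem.List.slice_to_natCast,
      show ((2:Int) * ((s.length / 3 : Nat):Int)) = ((2 * (s.length / 3) : Nat) : Int) by push_cast; ring,
      show ((3:Int) * ((s.length / 3 : Nat):Int)) = ((3 * (s.length / 3) : Nat) : Int) by push_cast; ring,
      PySem.List.slice_natCast, PySem.List.slice_natCast]
  have hlen0 : (s.take (s.length / 3)).length = s.length / 3 := by
    simp; omega
  rw [hlen0, List.nil_append, PySem.List.pyRange_one]
  rw [show ((((s.length / 3 / 3 : Nat) : Int)) - 0).toNat = s.length / 3 / 3 by omega]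
  rw [List.map_map]
  apply List.map_congr_left
  intro j hj
  rw [List.mem_range] at hj
  have hfit : 3 * j + 3 ≤ s.length / 3 := by omega
  simp only [Function.comp_apply, Int.zero_add]
  -- A side chunks
  rw [show (((j:Nat):Int) * 3 + 3 + ((s.length / 3 : Nat):Int)) = (((j:Nat):Int) * 3 + ((s.length / 3 : Nat):Int)) + 3 by ring,
      show (((j:Nat):Int) * 3 + 3 + ((s.length / 3 : Nat):Int) * 2) = (((j:Nat):Int) * 3 + ((s.length / 3 : Nat):Int) * 2) + 3 by ring,
      slice3 s _ (by positivity), slice3 s _ (by positivity), slice3 s _ (by positivity)]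
  rw [show (((j:Nat):Int) * 3).toNat = j * 3 by omega,
      show (((j:Nat):Int) * 3 + ((s.length / 3 : Nat):Int)).toNat = s.length / 3 + 3 * j by omega,
      show (((j:Nat):Int) * 3 + ((s.length / 3 : Nat):Int) * 2).toNat = 2 * (s.length / 3) + 3 * j by omega]
  -- B side chunks composed into chunks of s
  rw [show s.take (s.length / 3) = (s.drop 0).take (s.length / 3) by rw [List.drop_zero],
      show 2 * (s.length / 3) - s.length / 3 = s.length / 3 by omega,
      show 3 * (s.length / 3) - 2 * (s.length / 3) = s.length / 3 by omega,
      chunk_of_row s 0 (s.length / 3) (3 * j) hfit,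
      chunk_of_row s (s.length / 3) (s.length / 3) (3 * j) hfit,
      chunk_of_row s (2 * (s.length / 3)) (s.length / 3) (3 * j) hfit]
  rw [show j * 3 = 0 + 3 * j by ring]
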